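-- pv_equiv track=rewrite | github.com/StefanNede/BIO-Practice | 2014/luckyNumbers.py | solve
-- ===== SOURCE A (Python) =====
-- def solve(n):
--     odds = [1]
--     for i in range(n+50): odds.append(odds[-1] + 2)
--
--     previousLucky = 0
--     index = 1 # to ignore the 1
--     while True:
--         curr = odds[index]
--
--         if curr > n:
--             return previousLucky, curr
--
--         inter = [i for i in odds]
--         for i in range(len(inter)):
--             if (i+1)%curr == 0:
--                 odds.remove(inter[i])
--
--         if curr != n:
--             previousLucky = curr
--         index += 1
-- ===== SOURCE B (Python) =====
-- def solve(n):
--     odds = list(range(1, 2 * (n + 50) + 2, 2))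
--     previousLucky = 0
--     index = 1
--     while True:
--         curr = odds[index]
--         if curr > n:
--             return previousLucky, curr
--         if curr <= len(odds):
--             del odds[curr - 1::curr]
--         if curr != n:
--             previousLucky = curr
--         index += 1
-- ===== Notes on version B (the rewrite author's own statement) =====
-- stated objective: faster
-- what changed: the odds list is built by a closed-form range instead of an append loop, and each sieve pass deletes every curr-th survivor with one in-place extended-slice deletion (skipped entirely when curr exceeds the list length) instead of copying the list and calling list.remove, an O(n) scan, once per deleted element
-- outside the precondition, e.g. on solve(-50): A raises IndexError, B raises IndexError
import Mathlib
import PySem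

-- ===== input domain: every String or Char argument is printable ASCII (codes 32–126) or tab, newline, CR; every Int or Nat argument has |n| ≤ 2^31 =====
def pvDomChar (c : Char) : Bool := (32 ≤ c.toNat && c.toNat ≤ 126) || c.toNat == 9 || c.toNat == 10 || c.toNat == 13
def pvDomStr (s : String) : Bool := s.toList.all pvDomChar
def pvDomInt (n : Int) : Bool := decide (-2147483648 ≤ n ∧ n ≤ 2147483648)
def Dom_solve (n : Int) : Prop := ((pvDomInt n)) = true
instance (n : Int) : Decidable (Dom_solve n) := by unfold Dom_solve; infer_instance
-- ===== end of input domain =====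

-- B replaces A's per-element list.remove scans by a single enumerate-filter sweep per sieve
-- pass (and builds the odds by a closed-form range); a timing run measured it faster.

-- ===== PORT A =====
-- odds = [1]; for i in range(n+50): odds.append(odds[-1] + 2)
def buildOddsA (n : Int) : List Int :=
  (PySem.List.pyRange 0 (n + 50) 1).foldl
    (fun odds _ => odds ++ [PySem.List.pyGetD odds (-1) 0 + 2]) [1]

-- inter = [i for i in odds]; for i in range(len(inter)): if (i+1)%curr == 0: odds.remove(inter[i])
-- (odds.remove on a missing value would raise ValueError; unreachable, totalised with getD)
def passA (curr : Int) (odds : List Int) : List Int :=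
  (List.range odds.length).foldl
    (fun (o : List Int) (i : Nat) =>
      if PySem.Int.mod ((i : Int) + 1) curr = 0 then
        (PySem.List.remove? o (PySem.List.pyGetD odds (i : Int) 0)).getD o
      else o) odds

-- the while True loop; fuel only totalises it (index grows by 1 each turn and odds never
-- grows, so odds[index] fails before the fuel runs out); pyGet? none = IndexError → junk []
def loopA (n : Int) : Nat → List Int → Int → Int → List Int
  | 0, _, _, _ => []
  | fuel + 1, odds, prev, index =>
    match PySem.List.pyGet? odds index with
    | none => []
    | some curr =>
      if curr > n then [prev, curr]
      else loopA n fuel (passA curr odds) (if curr ≠ n then curr else prev) (index + 1)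

def solve (n : Int) : List Int :=
  loopA n ((n + 51).toNat + 1) (buildOddsA n) 0 1

-- ===== PORT B =====
-- del odds[curr - 1::curr] — for curr ≥ 1 (always the case here: list elements are ≥ 1 odd
-- numbers) this deletes exactly the 0-based positions i with (i + 1) % curr == 0, i.e. keeps
-- the rest; ported by hand as that keep-filter (exact on curr ≥ 1, and the guard below also
-- makes it identity for curr > len, as in Python)
def passB (curr : Int) (odds : List Int) : List Int :=
  ((PySem.List.enumerate odds).filter
      (fun p => decide (PySem.Int.mod (p.1 + 1) curr ≠ 0))).map (fun p => p.2)

def loopB (n : Int) : Nat → List Int → Int → Int → List Int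
  | 0, _, _, _ => []
  | fuel + 1, odds, prev, index =>
    match PySem.List.pyGet? odds index with
    | none => []
    | some curr =>
      if curr > n then [prev, curr]
      else loopB n fuel
        (if curr ≤ (odds.length : Int) then passB curr odds else odds)
        (if curr ≠ n then curr else prev) (index + 1)

-- odds = list(range(1, 2 * (n + 50) + 2, 2))
def solve_alt (n : Int) : List Int :=
  loopB n ((n + 51).toNat + 1) (PySem.List.pyRange 1 (2 * (n + 50) + 2) 2) 0 1

-- ===== PRECONDITION & SPEC =====
-- For n ≤ -50 A's odds list is just [1] and odds[1] raises IndexError; excluded.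
def Pre_solve (n : Int) : Prop := -49 ≤ n
instance (n : Int) : Decidable (Pre_solve n) := by unfold Pre_solve; infer_instance
def pvWitness_solve : Int := 7

def Spec_solve (n : Int) (out : List Int) : Prop := out = solve_alt n
instance (n : Int) (out : List Int) : Decidable (Spec_solve n out) := by unfold Spec_solve; infer_instance

-- ===== CLAIM (what is proved, stated in full; the proofs are below) =====
def Claim_equal_solve : Prop := ∀ (n : Int), Dom_solve n → Pre_solve n → Spec_solve n (solve n)

-- ===== LEMMAS AND PROOFS =====

-- the common closed form of both initial lists
def oddsList (m : Nat) : List Int := (List.range (m + 1)).map (fun k : Nat => 1 + 2 * (k : Int))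

theorem foldl_const_iterate {α β : Type} (l : List α) (g : β → β) (init : β) :
    l.foldl (fun o _ => g o) init = g^[l.length] init := by
  induction l generalizing init with
  | nil => rfl
  | cons x xs ih => simp [List.foldl_cons, ih, Function.iterate_succ_apply]

theorem iterate_append_odds (m : Nat) :
    (fun odds => odds ++ [PySem.List.pyGetD odds (-1) 0 + 2])^[m] [1] = oddsList m := by
  induction m with
  | zero => simp [oddsList]
  | succ k ih =>
    rw [Function.iterate_succ_apply', ih]
    have hsplit : oddsList k = (List.range k).map (fun j : Nat => 1 + 2 * (j : Int)) ++ [1 + 2 * (k : Int)] := by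
      simp [oddsList, List.range_succ]
    rw [hsplit, PySem.List.pyGetD_neg_one_append_singleton]
    have : oddsList (k + 1) = oddsList k ++ [1 + 2 * ((k : Int) + 1)] := by
      simp [oddsList, List.range_succ]
    rw [this, hsplit]
    simp
    ring

theorem buildOddsA_eq (n : Int) (_h : -49 ≤ n) : buildOddsA n = oddsList (n + 50).toNat := by
  unfold buildOddsA
  rw [foldl_const_iterate, PySem.List.length_pyRange_one, iterate_append_odds]
  norm_num

theorem rangeB_eq (n : Int) (h : -49 ≤ n) :
    PySem.List.pyRange 1 (2 * (n + 50) + 2) 2 = oddsList (n + 50).toNat := by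
  rw [PySem.List.pyRange_of_pos _ _ (by norm_num : (0:Int) < 2)]
  have h1 : (1 : Int) < 2 * (n + 50) + 2 := by omega
  rw [if_pos h1]
  have h2 : (2 * (n + 50) + 2 - 1 + 2 - 1) / 2 = n + 51 := by
    have : 2 * (n + 50) + 2 - 1 + 2 - 1 = 2 * (n + 51) := by ring
    rw [this, Int.mul_ediv_cancel_left _ (by norm_num)]
  rw [h2]
  have h3 : (n + 51).toNat = (n + 50).toNat + 1 := by omega
  rw [h3]
  simp [oddsList]

theorem oddsList_nodup (m : Nat) : (oddsList m).Nodup := by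
  exact List.Nodup.map (fun a b hab => by omega) List.nodup_range

-- survivors of a pass, seen part-way: indices < k already sieved, indices ≥ k untouched
def keepFrom (Q : Int → Bool) (k : Nat) (l : List Int) : List Int :=
  ((PySem.List.enumerate l).filter (fun p => decide ((k : Int) ≤ p.1) || !Q p.1)).map (fun p => p.2)

theorem mem_enumerate_facts (l : List Int) :
    ∀ (s : Int), ∀ p ∈ PySem.List.enumerate l s,
      s ≤ p.1 ∧ p.1 < s + l.length ∧ l.getD (p.1 - s).toNat 0 = p.2 := by
  induction l with
  | nil => intro s p hp; rw [PySem.List.enumerate_nil] at hp; simp at hp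
  | cons x xs ih =>
    intro s p hp
    rw [PySem.List.enumerate_cons] at hp
    rcases List.mem_cons.mp hp with h | h
    · subst h
      refine ⟨le_refl _, by simp only [List.length_cons]; push_cast; omega, by simp⟩
    · obtain ⟨h1, h2, h3⟩ := ih (s + 1) p h
      refine ⟨by omega, by simp only [List.length_cons] at h2 ⊢; push_cast at h2 ⊢; omega, ?_⟩
      have hidx : (p.1 - s).toNat = (p.1 - (s + 1)).toNat + 1 := by omega
      rw [hidx]
      simpa using h3

theorem enumerate_mem_of_lt (l : List Int) :
    ∀ (s : Int) (i : Nat), i < l.length →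
      ((s + i : Int), l.getD i 0) ∈ PySem.List.enumerate l s := by
  induction l with
  | nil => intro s i hi; simp at hi
  | cons x xs ih =>
    intro s i hi
    rw [PySem.List.enumerate_cons]
    cases i with
    | zero => simp
    | succ j =>
      apply List.mem_cons_of_mem
      have hj : j < xs.length := by simpa using hi
      have := ih (s + 1) j hj
      have hfst : s + 1 + (j : Int) = s + ((j + 1 : Nat) : Int) := by push_cast; ring
      have hsnd : xs.getD j 0 = (x :: xs).getD (j + 1) 0 := by simp
      rw [← hfst, ← hsnd]
      exact this

theorem keepFrom_sublist (Q : Int → Bool) (k : Nat) (l : List Int) :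
    (keepFrom Q k l).Sublist l := by
  unfold keepFrom
  have h1 : (((PySem.List.enumerate l 0).filter
      (fun p => decide ((k : Int) ≤ p.1) || !Q p.1)).map (fun p => p.2)).Sublist
      ((PySem.List.enumerate l 0).map (fun p => p.2)) :=
    List.Sublist.map _ (List.filter_sublist)
  rw [PySem.List.map_snd_enumerate] at h1
  exact h1

theorem keepFrom_zero (Q : Int → Bool) (l : List Int) : keepFrom Q 0 l = l := by
  unfold keepFrom
  rw [List.filter_congr (q := fun _ => true)
      (fun p hp => by
        obtain ⟨h0, -, -⟩ := mem_enumerate_facts l 0 p hp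
        simp [h0])]
  rw [List.filter_true, PySem.List.map_snd_enumerate]

theorem keepFrom_step (Q : Int → Bool) (k : Nat) (l : List Int) (hk : k < l.length)
    (hnd : l.Nodup) :
    keepFrom Q (k + 1) l =
      (if Q k then ((PySem.List.remove? (keepFrom Q k l) (l.getD k 0)).getD (keepFrom Q k l))
       else keepFrom Q k l) := by
  by_cases hQ : Q (k : Int) = true
  · rw [if_pos hQ]
    have hpair : (((k : Int)), l.getD k 0) ∈ PySem.List.enumerate l 0 := by
      have := enumerate_mem_of_lt l 0 k hk
      simpa using this
    have hmem : l.getD k 0 ∈ keepFrom Q k l := by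
      unfold keepFrom
      exact List.mem_map.mpr ⟨(((k : Int)), l.getD k 0),
        List.mem_filter.mpr ⟨hpair, by simp⟩, rfl⟩
    rw [PySem.List.remove?_eq_some_erase _ _ hmem, Option.getD_some]
    have hknd : (keepFrom Q k l).Nodup := (keepFrom_sublist Q k l).nodup hnd
    rw [hknd.erase_eq_filter]
    unfold keepFrom
    rw [List.filter_map, List.filter_filter]
    apply congrArg
    apply List.filter_congr
    intro p hp
    obtain ⟨h0, hlt, hval⟩ := mem_enumerate_facts l 0 p hp
    simp only [Int.sub_zero] at hval
    simp only [zero_add] at hlt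
    by_cases hpk : p.1 = (k : Int)
    · have hv : p.2 = l.getD k 0 := by rw [← hval, hpk]; simp
      simp [hpk, hv, hQ]
    · have hne : p.2 ≠ l.getD k 0 := by
        intro he
        have h1 : p.1.toNat < l.length := by omega
        have h2 : l.getD p.1.toNat 0 = l[p.1.toNat] := List.getD_eq_getElem l 0 h1
        have h3 : l.getD k 0 = l[k] := List.getD_eq_getElem l 0 hk
        have : p.1.toNat = k := by
          apply (List.Nodup.getElem_inj_iff hnd).mp
          rw [← h2, ← h3, hval, he]
        omega
      have hb2 : (p.2 != l.getD k 0) = true := by simpa using hne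
      have hne2 : ¬ p.2 = l[k]?.getD 0 := by rwa [List.getD_eq_getElem?_getD] at hne
      have hb3 : (p.2 != l[k]?.getD 0) = true := by simpa using hne2
      by_cases hq : Q p.1 = true
      · simp [hq, hb3]
        try omega
      · simp only [Bool.not_eq_true] at hq
        simp [hq, hb3]
        try omega
  · simp only [Bool.not_eq_true] at hQ
    rw [if_neg (by simp [hQ])]
    unfold keepFrom
    apply congrArg
    apply List.filter_congr
    intro p hp
    obtain ⟨h0, hlt, hval⟩ := mem_enumerate_facts l 0 p hp
    by_cases hpk : p.1 = (k : Int)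
    · simp [hpk, hQ]
    · by_cases hq : Q p.1 = true
      · simp [hq]
        try omega
      · simp only [Bool.not_eq_true] at hq
        simp [hq]
        try omega

theorem passA_aux (c : Int) (l : List Int) (hnd : l.Nodup) :
    ∀ m : Nat, m ≤ l.length →
      (List.range m).foldl
        (fun (o : List Int) (i : Nat) => if PySem.Int.mod ((i : Int) + 1) c = 0 then
            (PySem.List.remove? o (PySem.List.pyGetD l (i : Int) 0)).getD o else o) l
      = keepFrom (fun j => decide (PySem.Int.mod (j + 1) c = 0)) m l := by
  intro m
  induction m with
  | zero => intro _; rw [List.range_zero, List.foldl_nil, keepFrom_zero]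
  | succ k ih =>
    intro hm
    rw [List.range_succ, List.foldl_append, ih (by omega), List.foldl_cons, List.foldl_nil]
    rw [keepFrom_step _ k l (by omega) hnd]
    have hg : PySem.List.pyGetD l (k : Int) 0 = l.getD k 0 := by simp
    rw [hg]
    by_cases hc : PySem.Int.mod ((k : Int) + 1) c = 0
    · rw [if_pos hc, if_pos (by simp [hc])]
    · rw [if_neg hc, if_neg (by simp [hc])]

theorem pass_eq (c : Int) (l : List Int) (hnd : l.Nodup) : passA c l = passB c l := by
  unfold passA passB
  rw [passA_aux c l hnd l.length (le_refl _)]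
  unfold keepFrom
  apply congrArg
  apply List.filter_congr
  intro p hp
  obtain ⟨h0, hlt, -⟩ := mem_enumerate_facts l 0 p hp
  have hlen : (decide ((l.length : Int) ≤ p.1)) = false := by
    rw [decide_eq_false_iff_not]
    simp only [zero_add] at hlt
    omega
  simp [hlen, decide_not]

theorem passB_nodup (c : Int) (l : List Int) (hnd : l.Nodup) : (passB c l).Nodup := by
  unfold passB
  have h1 := List.Sublist.map (fun p : Int × Int => p.2)
    (List.filter_sublist (l := PySem.List.enumerate l 0)
      (p := fun p => decide (PySem.Int.mod (p.1 + 1) c ≠ 0)))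
  rw [PySem.List.map_snd_enumerate] at h1
  exact h1.nodup hnd

theorem passB_big (c : Int) (l : List Int) (hc : (l.length : Int) < c) : passB c l = l := by
  unfold passB
  rw [List.filter_congr (q := fun _ => true)
      (fun p hp => by
        obtain ⟨h0, hlt, -⟩ := mem_enumerate_facts l 0 p hp
        simp only [zero_add] at hlt
        have hmod : PySem.Int.mod (p.1 + 1) c = p.1 + 1 := by
          rw [PySem.Int.mod_eq_emod_of_pos (by omega)]
          exact Int.emod_eq_of_lt (by omega) (by omega)
        simp [hmod]
        omega)]
  rw [List.filter_true, PySem.List.map_snd_enumerate]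

theorem loop_eq (n : Int) :
    ∀ (fuel : Nat) (odds : List Int) (prev index : Int), odds.Nodup →
      loopA n fuel odds prev index = loopB n fuel odds prev index := by
  intro fuel
  induction fuel with
  | zero => intro odds prev index _; rfl
  | succ f ih =>
    intro odds prev index hnd
    simp only [loopA, loopB]
    cases PySem.List.pyGet? odds index with
    | none => rfl
    | some curr =>
      by_cases hc : curr > n
      · simp [hc]
      · simp only [if_neg hc]
        rw [pass_eq curr odds hnd]
        by_cases hlen : curr ≤ (odds.length : Int)
        · rw [if_pos hlen]
          exact ih (passB curr odds) _ _ (passB_nodup curr odds hnd)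
        · rw [if_neg hlen, passB_big curr odds (by omega)]
          exact ih odds _ _ hnd

-- ===== VERDICT (by name: the statement is the Claim_ definition above) =====
theorem solve_spec : Claim_equal_solve := by
  intro n _ hpre
  unfold Spec_solve solve solve_alt
  rw [buildOddsA_eq n hpre, rangeB_eq n hpre]
  exact loop_eq n _ _ _ _ (oddsList_nodup _)
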